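-- pv_equiv track=rewrite | github.com/yhsol/algorithm_study | code_test/acmicpc/acmicpc_1065.py | solve
-- ===== SOURCE A (Python) =====
-- def solve(data):
--     result = []
--     for i in range(1, data + 1):
--         if len(str(i)) > 1:
--             if str(i)[0] == str(i)[1]:
--                 result.append(i)
--         else:
--             result.append(i)
--     return len(result)
-- ===== SOURCE B (Python) =====
-- def _top_two_equal(m):
--     # first two decimal digits of m (m >= 10) are equal  iff  its top-two-digit
--     # prefix is a multiple of 11
--     while m >= 100:
--         m //= 10
--     return m % 11 == 0
--
--
-- def _g(n):
--     # number of i in 1..n whose first two digits are equal (1-digit numbers count)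
--     if n < 10:
--         return max(n, 0)
--     if n < 100:
--         return 9 + n // 11
--     m = n // 10
--     return 18 + 10 * (_g(m - 1) - 9) + ((n % 10 + 1) if _top_two_equal(m) else 0)
--
--
-- def solve(data):
--     return _g(data)
-- ===== Notes on version B (the rewrite author's own statement) =====
-- stated objective: faster
-- what changed: Replaced the per-number string scan of 1..n with a recursive closed-form digit count: counts for 1..n are expressed via the count for 1..(n//10 - 1) plus an arithmetic correction, so no number is ever enumerated or converted to a string.
import Mathlib
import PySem

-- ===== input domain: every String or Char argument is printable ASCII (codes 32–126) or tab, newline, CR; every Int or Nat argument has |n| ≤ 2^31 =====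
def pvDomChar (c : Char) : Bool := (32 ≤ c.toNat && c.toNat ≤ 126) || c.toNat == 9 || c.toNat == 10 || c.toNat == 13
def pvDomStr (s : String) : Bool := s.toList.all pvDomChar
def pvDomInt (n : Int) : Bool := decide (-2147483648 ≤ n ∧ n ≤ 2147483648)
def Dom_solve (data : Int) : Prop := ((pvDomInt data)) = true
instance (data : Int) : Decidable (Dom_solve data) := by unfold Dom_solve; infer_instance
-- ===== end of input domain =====

-- B replaces A's per-number string scan of 1..n by a recursive closed-form digit count (O(log n) recursion on n//10); objective: faster.

-- ===== PORT A =====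
def solve (data : Int) : Int :=
  let result := (PySem.List.pyRange 1 (data + 1) 1).foldl (fun result i =>
    if PySem.Str.len (PySem.Int.toStr i) > 1 then
      if PySem.Str.pyGet? (PySem.Int.toStr i) 0 == PySem.Str.pyGet? (PySem.Int.toStr i) 1 then
        result ++ [i]
      else result
    else result ++ [i]) ([] : List Int)
  PySem.List.len result

-- ===== PORT B =====
-- first two decimal digits of m (m ≥ 10) are equal iff its top-two-digit prefix is a multiple of 11
def topTwoEqual (m : Int) : Bool :=
  if _h : 100 ≤ m then topTwoEqual (PySem.Int.floordiv m 10)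
  else PySem.Int.mod m 11 == 0
termination_by m.toNat
decreasing_by
  rw [PySem.Int.floordiv_eq_ediv_of_pos (by omega : (0:Int) < 10)]
  omega

-- number of i in 1..n whose first two digits are equal (1-digit numbers count)
def gAux (n : Int) : Int :=
  if n < 10 then max n 0
  else if n < 100 then 9 + PySem.Int.floordiv n 11
  else
    let m := PySem.Int.floordiv n 10
    18 + 10 * (gAux (m - 1) - 9) +
      (if topTwoEqual m then PySem.Int.mod n 10 + 1 else 0)
termination_by n.toNat
decreasing_by
  rw [PySem.Int.floordiv_eq_ediv_of_pos (by omega : (0:Int) < 10)]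
  omega

def solve_alt (data : Int) : Int := gAux data

-- ===== PRECONDITION & SPEC =====
def Spec_solve (data : Int) (out : Int) : Prop := out = solve_alt data
instance (data : Int) (out : Int) : Decidable (Spec_solve data out) := by unfold Spec_solve; infer_instance

-- ===== CLAIM (what is proved, stated in full; the proofs are below) =====
def Claim_equal_solve : Prop := ∀ (data : Int), Dom_solve data → Spec_solve data (solve data)

-- ===== LEMMAS AND PROOFS =====

-- A's per-element test, as a Boolean predicate
def pA (i : Int) : Bool :=
  if PySem.Str.len (PySem.Int.toStr i) > 1 then
    PySem.Str.pyGet? (PySem.Int.toStr i) 0 == PySem.Str.pyGet? (PySem.Int.toStr i) 1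
  else true

-- count of elements of 1..n passing A's test
def cA (n : Int) : Int := (((PySem.List.pyRange 1 (n + 1) 1).countP pA : Nat) : Int)

-- decimal digit characters of a natural number, most significant first
def pvD (n : Nat) : List Char :=
  if n < 10 then [Nat.digitChar n] else pvD (n / 10) ++ [Nat.digitChar (n % 10)]
decreasing_by omega

-- the two-digit prefix of n (n itself when n < 100)
def pvTop2 (n : Nat) : Nat :=
  if n < 100 then n else pvTop2 (n / 10)
decreasing_by omega

lemma solve_eq_cA (data : Int) : solve data = cA data := by
  unfold solve cA
  have hfun : (fun (result : List Int) i =>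
      if PySem.Str.len (PySem.Int.toStr i) > 1 then
        if PySem.Str.pyGet? (PySem.Int.toStr i) 0 == PySem.Str.pyGet? (PySem.Int.toStr i) 1 then
          result ++ [i]
        else result
      else result ++ [i])
      = (fun (result : List Int) i => if pA i then result ++ [i] else result) := by
    funext result i
    unfold pA
    by_cases h1 : PySem.Str.len (PySem.Int.toStr i) > 1
    · rw [if_pos h1, if_pos h1]
    · rw [if_neg h1, if_neg h1]
      simp
  rw [hfun, PySem.List.foldl_append_if_eq_filter]
  simp [PySem.List.len_eq, List.countP_eq_length_filter]

lemma pvD_ge (n : Nat) (h : 10 ≤ n) :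
    pvD n = pvD (n / 10) ++ [Nat.digitChar (n % 10)] := by
  conv_lhs => rw [pvD]
  rw [if_neg (by omega)]

lemma toDigitsCore_eq_pvD : ∀ (f n : Nat) (acc : List Char), 0 < f → n < 10 ^ f →
    Nat.toDigitsCore 10 f n acc = pvD n ++ acc := by
  intro f
  induction f with
  | zero => intro n acc h _; omega
  | succ f ih =>
    intro n acc _ hlt
    simp only [Nat.toDigitsCore]
    by_cases hz : n / 10 = 0
    · rw [if_pos hz, pvD, if_pos (by omega : n < 10)]
      simp [Nat.mod_eq_of_lt (by omega : n < 10)]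
    · rw [if_neg hz]
      have hf : 0 < f := by
        by_contra hf0
        have : f = 0 := by omega
        subst this
        simp at hlt
        omega
      rw [ih (n / 10) _ hf (by
        have h10 : (10 : Nat) ^ (f + 1) = 10 ^ f * 10 := by ring
        rw [h10] at hlt
        omega)]
      rw [pvD_ge n (by omega)]
      simp

lemma toChars_nonneg (i : Int) (h : 0 ≤ i) : PySem.Int.toChars i = pvD i.toNat := by
  unfold PySem.Int.toChars
  rw [if_neg (by omega : ¬ i < 0)]
  unfold Nat.toDigits
  rw [toDigitsCore_eq_pvD (i.toNat + 1) i.toNat [] (by omega)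
    (lt_of_lt_of_le (Nat.lt_pow_self (by norm_num))
      (Nat.pow_le_pow_right (by norm_num) (Nat.le_succ _)))]
  simp

lemma pvD_length_one (n : Nat) (h : n < 10) : pvD n = [Nat.digitChar n] := by
  rw [pvD]; simp [h]

lemma pvD_ne_nil (n : Nat) : pvD n ≠ [] := by
  rw [pvD]; split <;> simp

lemma pvD_length_ge_two (n : Nat) (h : 10 ≤ n) : 2 ≤ (pvD n).length := by
  rw [pvD_ge n h]
  have hne := pvD_ne_nil (n / 10)
  simp only [List.length_append, List.length_cons, List.length_nil]
  have : (pvD (n / 10)).length ≠ 0 := by simpa [List.length_eq_zero_iff] using hne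
  omega

lemma pvTop2_lt (n : Nat) (h : n < 100) : pvTop2 n = n := by
  rw [pvTop2]; simp [h]

lemma pvTop2_ge (n : Nat) (h : 100 ≤ n) : pvTop2 n = pvTop2 (n / 10) := by
  conv_lhs => rw [pvTop2]
  rw [if_neg (by omega : ¬ n < 100)]

lemma pvTop2_bounds : ∀ (n : Nat), 10 ≤ n → 10 ≤ pvTop2 n ∧ pvTop2 n < 100 := by
  intro n
  induction n using Nat.strong_induction_on with
  | _ n ih =>
    intro h
    by_cases h100 : n < 100
    · rw [pvTop2_lt n h100]; omega
    · rw [pvTop2_ge n (by omega)]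
      exact ih (n / 10) (by omega) (by omega)

lemma pvD_first_two : ∀ (n : Nat), 10 ≤ n →
    (pvD n)[0]? = some (Nat.digitChar (pvTop2 n / 10)) ∧
    (pvD n)[1]? = some (Nat.digitChar (pvTop2 n % 10)) := by
  intro n
  induction n using Nat.strong_induction_on with
  | _ n ih =>
    intro h
    by_cases h100 : n < 100
    · rw [pvD_ge n h, pvD_length_one (n / 10) (by omega), pvTop2_lt n h100]
      simp
    · rw [pvD_ge n h, pvTop2_ge n (by omega)]
      have h2 := pvD_length_ge_two (n / 10) (by omega)
      have ih' := ih (n / 10) (by omega) (by omega)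
      refine ⟨?_, ?_⟩
      · rw [List.getElem?_append_left (by omega)]; exact ih'.1
      · rw [List.getElem?_append_left (by omega)]; exact ih'.2

lemma digitChar_inj : ∀ a < 10, ∀ b < 10,
    ((Nat.digitChar a = Nat.digitChar b) ↔ a = b) := by decide

lemma two_digit_eq_iff : ∀ t < 100, 10 ≤ t → ((t / 10 = t % 10) ↔ t % 11 = 0) := by decide

-- A's test, characterised arithmetically
lemma pA_char (i : Int) (h : 1 ≤ i) :
    pA i = (decide (i < 10) || decide (pvTop2 i.toNat % 11 = 0)) := by
  unfold pA
  have hts : (PySem.Int.toStr i).toList = pvD i.toNat := by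
    rw [PySem.Int.toList_toStr, toChars_nonneg i (by omega)]
  rw [PySem.Str.len_eq, hts]
  by_cases h10 : i < 10
  · rw [pvD_length_one i.toNat (by omega), if_neg (by simp)]
    simp [h10]
  · have hn10 : 10 ≤ i.toNat := by omega
    have h2 := pvD_length_ge_two i.toNat hn10
    rw [if_pos (by omega)]
    have hft := pvD_first_two i.toNat hn10
    have hb := pvTop2_bounds i.toNat hn10
    unfold PySem.Str.pyGet?
    rw [hts]
    have hg0 : PySem.Chars.pyGet? (pvD i.toNat) 0 = (pvD i.toNat)[(0 : Nat)]? := by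
      rw [show (0 : Int) = ((0 : Nat) : Int) from rfl]
      apply PySem.List.pyGet?_natCast
    have hg1 : PySem.Chars.pyGet? (pvD i.toNat) 1 = (pvD i.toNat)[(1 : Nat)]? := by
      rw [show (1 : Int) = ((1 : Nat) : Int) from rfl]
      apply PySem.List.pyGet?_natCast
    rw [hg0, hg1, hft.1, hft.2, Bool.eq_iff_iff]
    simp only [beq_iff_eq, Option.some.injEq, Bool.or_eq_true, decide_eq_true_eq]
    rw [digitChar_inj _ (by omega) _ (by omega),
      two_digit_eq_iff (pvTop2 i.toNat) (by omega) (by omega)]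
    omega

lemma cA_succ (n : Int) (h : 0 ≤ n) :
    cA (n + 1) = cA n + (if pA (n + 1) then 1 else 0) := by
  unfold cA
  rw [PySem.List.pyRange_one_succ_right (by omega : (1 : Int) ≤ n + 1)]
  rw [List.countP_append]
  by_cases hp : pA (n + 1) <;> simp [hp]

lemma cA_small : ∀ (n : Int), 0 ≤ n → n ≤ 9 → cA n = n := by
  intro n h0
  induction n, h0 using Int.le_induction with
  | base =>
    intro _
    unfold cA
    rw [PySem.List.pyRange_one_eq_nil (by omega)]
    simp
  | succ n hn ih =>
    intro h9
    rw [cA_succ n hn, ih (by omega)]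
    have hp : pA (n + 1) = true := by
      rw [pA_char (n + 1) (by omega)]
      simp only [Bool.or_eq_true, decide_eq_true_eq]
      left; omega
    rw [hp]
    simp

lemma cA_mid : ∀ (n : Int), 9 ≤ n → n ≤ 99 → cA n = 9 + n / 11 := by
  intro n h0
  induction n, h0 using Int.le_induction with
  | base => intro _; rw [cA_small 9 (by omega) (by omega)]; decide
  | succ n hn ih =>
    intro h99
    rw [cA_succ n (by omega), ih (by omega)]
    have ht : pvTop2 (n + 1).toNat = (n + 1).toNat :=
      pvTop2_lt _ (by omega)
    have hp : pA (n + 1) = decide ((n + 1) % 11 = 0) := by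
      rw [pA_char (n + 1) (by omega), ht, Bool.eq_iff_iff]
      simp only [Bool.or_eq_true, decide_eq_true_eq]
      omega
    rw [hp]
    simp only [decide_eq_true_eq]
    split_ifs with hd <;> omega

lemma cA_big : ∀ (n : Int), 100 ≤ n →
    cA n = 18 + 10 * (cA (n / 10 - 1) - 9) +
      (if pvTop2 (n / 10).toNat % 11 = 0 then n % 10 + 1 else 0) := by
  intro n h0
  induction n, h0 using Int.le_induction with
  | base =>
    have h99 : cA 99 = 18 := by rw [cA_mid 99 (by omega) (by omega)]; decide
    have ht100 : pvTop2 (100 : Int).toNat = 10 := by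
      rw [show (100 : Int).toNat = 100 from rfl, pvTop2_ge 100 (by omega),
        show (100 : Nat) / 10 = 10 from rfl, pvTop2_lt 10 (by omega)]
    have hp : pA (99 + 1 : Int) = false := by
      rw [show (99 + 1 : Int) = 100 from by norm_num, pA_char 100 (by omega), ht100]
      decide
    have h100 : cA 100 = 18 := by
      rw [show (100 : Int) = 99 + 1 from by norm_num, cA_succ 99 (by omega), h99, hp]
      simp
    rw [h100, show (100 : Int) / 10 - 1 = 9 from by decide,
      cA_small 9 (by omega) (by omega),
      show ((100 : Int) / 10).toNat = 10 from rfl, pvTop2_lt 10 (by omega)]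
    norm_num
  | succ n hn ih =>
    have hmn : ((n + 1) / 10).toNat = (n + 1).toNat / 10 := by omega
    have htp : pvTop2 (n + 1).toNat = pvTop2 ((n + 1) / 10).toNat := by
      rw [pvTop2_ge (n + 1).toNat (by omega), hmn]
    have hp : pA (n + 1) = decide (pvTop2 ((n + 1) / 10).toNat % 11 = 0) := by
      rw [pA_char (n + 1) (by omega), htp, Bool.eq_iff_iff]
      simp only [Bool.or_eq_true, decide_eq_true_eq]
      omega
    rw [cA_succ n (by omega), ih, hp]
    simp only [decide_eq_true_eq]
    by_cases hz : (n + 1) % 10 = 0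
    · have hm : (n + 1) / 10 = n / 10 + 1 := by omega
      have hm9 : n % 10 = 9 := by omega
      have hstep : cA (n / 10) = cA (n / 10 - 1) + (if pA (n / 10) then 1 else 0) := by
        have hcs := cA_succ (n / 10 - 1) (by omega)
        rw [show n / 10 - 1 + 1 = n / 10 from by ring] at hcs
        exact hcs
      have hpm : pA (n / 10) = decide (pvTop2 (n / 10).toNat % 11 = 0) := by
        rw [pA_char (n / 10) (by omega), Bool.eq_iff_iff]
        simp only [Bool.or_eq_true, decide_eq_true_eq]
        omega
      rw [hm, show n / 10 + 1 - 1 = n / 10 from by ring, hstep, hpm]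
      simp only [decide_eq_true_eq]
      split_ifs with c1 c2 <;> omega
    · have hm : (n + 1) / 10 = n / 10 := by omega
      rw [hm]
      split_ifs with c1 <;> omega

lemma topTwoEqual_eq : ∀ (k : Nat) (m : Int), m.toNat ≤ k → 0 ≤ m →
    topTwoEqual m = decide (pvTop2 m.toNat % 11 = 0) := by
  intro k
  induction k with
  | zero =>
    intro m hk h0
    rw [topTwoEqual, dif_neg (by omega : ¬ (100 : Int) ≤ m)]
    rw [PySem.Int.mod_eq_emod_of_pos (by omega), pvTop2_lt _ (by omega), Bool.eq_iff_iff]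
    simp only [beq_iff_eq, decide_eq_true_eq]
    omega
  | succ k ih =>
    intro m hk h0
    by_cases h100 : (100 : Int) ≤ m
    · rw [topTwoEqual, dif_pos h100,
        PySem.Int.floordiv_eq_ediv_of_pos (by omega : (0 : Int) < 10),
        ih (m / 10) (by omega) (by omega),
        pvTop2_ge m.toNat (by omega)]
      have : (m / 10).toNat = m.toNat / 10 := by omega
      rw [this]
    · rw [topTwoEqual, dif_neg h100,
        PySem.Int.mod_eq_emod_of_pos (by omega), pvTop2_lt _ (by omega), Bool.eq_iff_iff]
      simp only [beq_iff_eq, decide_eq_true_eq]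
      omega

lemma gAux_eq_cA_aux : ∀ (k : Nat) (n : Int), n.toNat ≤ k → gAux n = cA n := by
  intro k
  induction k with
  | zero =>
    intro n hk
    rw [gAux, if_pos (by omega : n < 10)]
    unfold cA
    rw [PySem.List.pyRange_one_eq_nil (by omega)]
    simp
    omega
  | succ k ih =>
    intro n hk
    rw [gAux]
    by_cases h10 : n < 10
    · rw [if_pos h10]
      by_cases h0 : 0 ≤ n
      · rw [cA_small n h0 (by omega)]; omega
      · unfold cA
        rw [PySem.List.pyRange_one_eq_nil (by omega)]
        simp
        omega
    · rw [if_neg h10]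
      by_cases h100 : n < 100
      · rw [if_pos h100, cA_mid n (by omega) (by omega),
          PySem.Int.floordiv_eq_ediv_of_pos (by omega : (0 : Int) < 11)]
      · rw [if_neg h100]
        show 18 + 10 * (gAux (PySem.Int.floordiv n 10 - 1) - 9) +
            (if topTwoEqual (PySem.Int.floordiv n 10) then PySem.Int.mod n 10 + 1 else 0)
          = cA n
        rw [PySem.Int.floordiv_eq_ediv_of_pos (by omega : (0 : Int) < 10),
          PySem.Int.mod_eq_emod_of_pos (by omega : (0 : Int) < 10),
          topTwoEqual_eq k (n / 10) (by omega) (by omega),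
          ih (n / 10 - 1) (by omega),
          cA_big n (by omega)]
        simp only [decide_eq_true_eq]

lemma gAux_eq_cA (n : Int) : gAux n = cA n :=
  gAux_eq_cA_aux n.toNat n le_rfl

-- ===== VERDICT (by name: the statement is the Claim_ definition above) =====
theorem solve_spec : Claim_equal_solve := by
  intro data _
  unfold Spec_solve solve_alt
  rw [solve_eq_cA, gAux_eq_cA]
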